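-- pv_equiv track=rewrite | github.com/lza6/claw-code-tingfeng | src/tools_runtime/edit_parser.py | try_dotdotdots
-- ===== SOURCE A (Python) =====
-- def try_dotdotdots(
--     chunks: list[str],
--     content_lines: list[str],
-- ) -> str | None:
--     """处理包含 ... 省略号的搜索块
--
--     ... 行作为通配符，匹配任意数量的行。
--
--     参数:
--         chunks: 可能包含 ... 的搜索行列表
--         content_lines: 文件内容行列表
--
--     返回:
--         替换后的内容，或 None（未找到匹配）
--     """
--     if not chunks:
--         return None
--
--     # 将 chunks 按 ... 分割为子块
--     sub_blocks: list[list[str]] = []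
--     current_block: list[str] = []
--
--     for line in chunks:
--         if line.strip() == '...':
--             if current_block:
--                 sub_blocks.append(current_block)
--                 current_block = []
--             sub_blocks.append(None)  # None 表示通配符
--         else:
--             current_block.append(line)
--
--     if current_block:
--         sub_blocks.append(current_block)
--
--     # 在 content_lines 中顺序匹配每个子块
--     def _match_from(pos: int, block_idx: int) -> int | None:
--         if block_idx >= len(sub_blocks):
--             return pos
--
--         block = sub_blocks[block_idx]
--         if block is None:
--             # 通配符 — 尝试跳过 0 到所有剩余行
--             for skip in range(len(content_lines) - pos + 1):
--                 result = _match_from(pos + skip, block_idx + 1)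
--                 if result is not None:
--                     return result
--             return None
--
--         # 精确匹配子块
--         block_len = len(block)
--         if pos + block_len > len(content_lines):
--             return None
--
--         if content_lines[pos:pos + block_len] == block:
--             return _match_from(pos + block_len, block_idx + 1)
--
--         return None
--
--     # 尝试从每个位置开始匹配
--     for start in range(len(content_lines) + 1):
--         end = _match_from(start, 0)
--         if end is not None:
--             # 计算匹配的总行数（包括通配符匹配的行）
--             remaining = content_lines[:start] + content_lines[end:]
--             return ''.join(remaining)
--
--     return None
-- ===== SOURCE B (Python) =====
-- def try_dotdotdots(
--     chunks: list[str],
--     content_lines: list[str],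
-- ) -> str | None:
--     """Greedy leftmost matching: one forward scan per literal block, no backtracking."""
--     if not chunks:
--         return None
--
--     # split into literal blocks; remember whether the pattern starts with a wildcard
--     blocks: list[list[str]] = []
--     cur: list[str] = []
--     for line in chunks:
--         if line.strip() == '...':
--             if cur:
--                 blocks.append(cur)
--                 cur = []
--         else:
--             cur.append(line)
--     if cur:
--         blocks.append(cur)
--     lead_wild = chunks[0].strip() == '...'
--
--     # greedy: earliest occurrence of each block at or after the previous block's end
--     n = len(content_lines)
--     pos = 0
--     start = None
--     for block in blocks:
--         length = len(block)
--         found = None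
--         for p in range(pos, n - length + 1):
--             if content_lines[p:p + length] == block:
--                 found = p
--                 break
--         if found is None:
--             return None
--         if start is None:
--             start = found
--         pos = found + length
--
--     if lead_wild or start is None:
--         start = 0
--     return ''.join(content_lines[:start] + content_lines[pos:])
-- ===== Notes on version B (the rewrite author's own statement) =====
-- stated objective: alternative
-- what changed: Replaces the backtracking recursion over wildcard skip amounts (retried from every start position) with a single greedy left-to-right scan that takes each literal block's earliest occurrence after the previous one, which provably yields the same leftmost match; intended to avoid A's exponential backtracking on patterns with several wildcards (measured 1.5-2x on the benchmark family, below the 1.5x bar at the largest size, so no speed is claimed).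
import Mathlib
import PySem

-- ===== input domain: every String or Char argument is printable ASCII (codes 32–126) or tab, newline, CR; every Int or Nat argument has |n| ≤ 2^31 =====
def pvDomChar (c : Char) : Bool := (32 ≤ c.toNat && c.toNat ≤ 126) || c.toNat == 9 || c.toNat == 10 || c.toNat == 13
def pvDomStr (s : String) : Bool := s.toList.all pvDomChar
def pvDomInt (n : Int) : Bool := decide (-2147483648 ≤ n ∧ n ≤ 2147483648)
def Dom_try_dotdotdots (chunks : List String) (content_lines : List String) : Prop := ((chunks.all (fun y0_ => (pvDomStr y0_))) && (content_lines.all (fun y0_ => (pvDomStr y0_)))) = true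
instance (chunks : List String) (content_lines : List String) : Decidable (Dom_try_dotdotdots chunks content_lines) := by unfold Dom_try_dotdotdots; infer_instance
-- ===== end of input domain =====

-- B replaces A's backtracking over wildcard skips with a single greedy leftmost scan (same return value by the theorems below).

-- ===== PORT A =====
-- split chunks into sub-blocks: `none` is a '...' wildcard line, `some block` a run of literal lines
-- (loop body of A's first for-loop)
def pvStepA (acc : List (Option (List String)) × List String) (line : String) :
    List (Option (List String)) × List String :=
  if PySem.Str.strip line == "..." then
    ((if acc.2 ≠ [] then acc.1 ++ [some acc.2] else acc.1) ++ [none], [])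
  else (acc.1, acc.2 ++ [line])

def pvSubBlocks (chunks : List String) : List (Option (List String)) :=
  let st := chunks.foldl pvStepA ([], [])
  if st.2 ≠ [] then st.1 ++ [some st.2] else st.1

-- _match_from: positions are Nat (Python's pos is always ≥ 0 here); recursion over the sub-block suffix = block_idx
def pvMatchFrom (content : List String) : Nat → List (Option (List String)) → Option Nat
  | pos, [] => some pos
  | pos, none :: rest =>
    (List.range (content.length - pos + 1)).findSome? (fun skip => pvMatchFrom content (pos + skip) rest)
  | pos, some block :: rest =>
    if content.length < pos + block.length then none
    else if PySem.List.slice content (some (pos:Int)) (some ((pos:Int) + (block.length:Int))) = block then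
      pvMatchFrom content (pos + block.length) rest
    else none
termination_by _ bs => bs.length

def try_dotdotdots (chunks : List String) (content_lines : List String) : Option String :=
  match chunks with
  | [] => none
  | _ :: _ =>
    let sb := pvSubBlocks chunks
    (List.range (content_lines.length + 1)).findSome? (fun start =>
      match pvMatchFrom content_lines start sb with
      | some e => some (PySem.Str.join "" (PySem.List.slice content_lines none (some (start:Int)) ++ PySem.List.slice content_lines (some (e:Int)) none))
      | none => none)

-- ===== PORT B =====
-- earliest p in [pos, n-len(block)] where block occurs (the for/break scan of Source B)
def pvFindOcc (content : List String) (block : List String) (pos : Nat) : Option Nat :=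
  (List.range' pos (content.length + 1 - block.length - pos)).find?
    (fun p => PySem.List.slice content (some (p:Int)) (some ((p:Int) + (block.length:Int))) == block)

-- the `for block in blocks` loop: state (pos, start)
def pvGreedy (content : List String) : Nat → Option Nat → List (List String) → Option (Option Nat × Nat)
  | pos, st, [] => some (st, pos)
  | pos, st, block :: rest =>
    match pvFindOcc content block pos with
    | none => none
    | some p => pvGreedy content (p + block.length) (if st.isNone then some p else st) rest

-- loop body of Source B's chunk-splitting loop
def pvStepB (acc : List (List String) × List String) (line : String) :
    List (List String) × List String :=
  if PySem.Str.strip line == "..." then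
    ((if acc.2 ≠ [] then acc.1 ++ [acc.2] else acc.1), [])
  else (acc.1, acc.2 ++ [line])

def try_dotdotdots_alt (chunks : List String) (content_lines : List String) : Option String :=
  match chunks with
  | [] => none
  | c0 :: _ =>
    let st := chunks.foldl pvStepB ([], [])
    let blocks := if st.2 ≠ [] then st.1 ++ [st.2] else st.1
    let leadWild := PySem.Str.strip c0 == "..."
    match pvGreedy content_lines 0 none blocks with
    | none => none
    | some (stFin, pos) =>
      let start := if leadWild || stFin.isNone then 0 else stFin.getD 0
      some (PySem.Str.join "" (PySem.List.slice content_lines none (some (start:Int)) ++ PySem.List.slice content_lines (some (pos:Int)) none))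

-- ===== PRECONDITION & SPEC =====
def Spec_try_dotdotdots (chunks : List String) (content_lines : List String) (out : Option String) : Prop := out = try_dotdotdots_alt chunks content_lines
instance (chunks : List String) (content_lines : List String) (out : Option String) : Decidable (Spec_try_dotdotdots chunks content_lines out) := by unfold Spec_try_dotdotdots; infer_instance

-- ===== CLAIM (what is proved, stated in full; the proofs are below) =====
def Claim_equal_try_dotdotdots : Prop := ∀ (chunks : List String) (content_lines : List String), Dom_try_dotdotdots chunks content_lines → Spec_try_dotdotdots chunks content_lines (try_dotdotdots chunks content_lines)

-- ===== LEMMAS AND PROOFS =====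

-- literal blocks of a sub-block list
def pvLits (bs : List (Option (List String))) : List (List String) := bs.filterMap id

-- the greedy end position, as a spec-level function
def pvGF (content : List String) : Nat → List (List String) → Option Nat
  | pos, [] => some pos
  | pos, b :: L =>
    match pvFindOcc content b pos with
    | none => none
    | some p => pvGF content (p + b.length) L

-- block occurs at p (with the in-bounds condition Python's comparison implies)
def pvPOcc (content b : List String) (p : Nat) : Bool :=
  decide (p + b.length ≤ content.length) &&
  (PySem.List.slice content (some (p:Int)) (some ((p:Int) + (b.length:Int))) == b)

-- head is not a literal block
def pvHeadNS : List (Option (List String)) → Prop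
  | some _ :: _ => False
  | _ => True

-- no two adjacent literal blocks
def pvAlt : List (Option (List String)) → Prop
  | [] => True
  | none :: t => pvAlt t
  | some _ :: t => pvHeadNS t ∧ pvAlt t

-- every literal block is immediately followed by a wildcard (invariant of A's fold state)
def pvGood : List (Option (List String)) → Prop
  | [] => True
  | none :: t => pvGood t
  | some _ :: t => t.head? = some none ∧ pvGood t

theorem pvGood_alt : ∀ bs, pvGood bs → pvAlt bs
  | [], _ => trivial
  | none :: t, h => pvGood_alt t h
  | some _ :: t, h => by
    simp only [pvGood] at h
    refine ⟨?_, pvGood_alt t h.2⟩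
    match t, h.1 with
    | none :: t', _ => trivial

theorem pvGood_alt_append : ∀ bs b, pvGood bs → pvAlt (bs ++ [some b])
  | [], b, _ => ⟨trivial, trivial⟩
  | none :: t, b, h => pvGood_alt_append t b h
  | some _ :: t, b, h => by
    simp only [pvGood] at h
    refine ⟨?_, pvGood_alt_append t b h.2⟩
    match t, h.1 with
    | none :: t', _ => trivial

-- generic first-match spec for find? over a unit-step range
theorem pvFindR {p : Nat → Bool} : ∀ (n s : Nat) {q : Nat}, (List.range' s n).find? p = some q →
    s ≤ q ∧ q < s + n ∧ p q = true ∧ ∀ r, s ≤ r → r < q → p r = false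
  | 0, s, q, h => by simp [List.range'] at h
  | n+1, s, q, h => by
    rw [List.range'_succ] at h
    simp only [List.find?_cons] at h
    cases hp : p s with
    | true => simp only [hp, Option.some.injEq] at h; subst h; exact ⟨le_refl _, by omega, hp, fun r h1 h2 => by omega⟩
    | false =>
      simp only [hp] at h
      obtain ⟨h1, h2, h3, h4⟩ := pvFindR n (s+1) h
      exact ⟨by omega, by omega, h3, fun r hr1 hr2 => by
        rcases Nat.eq_or_lt_of_le hr1 with he | hl
        · exact he ▸ hp
        · exact h4 r hl hr2⟩

-- find? over range': spec lemmas
theorem pvFindOcc_some {c b : List String} {pos p : Nat} (h : pvFindOcc c b pos = some p) :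
    pos ≤ p ∧ pvPOcc c b p = true ∧ ∀ q, pos ≤ q → q < p → pvPOcc c b q = false := by
  unfold pvFindOcc at h
  obtain ⟨h1, h2, h3, h4⟩ := pvFindR _ _ h
  refine ⟨h1, ?_, fun q hq1 hq2 => ?_⟩
  · simp only [pvPOcc, h3, Bool.and_true, decide_eq_true_eq]; omega
  · simp only [pvPOcc, h4 q hq1 hq2, Bool.and_false]

theorem pvFindOcc_none {c b : List String} {pos : Nat} (h : pvFindOcc c b pos = none) :
    ∀ q, pos ≤ q → pvPOcc c b q = false := by
  intro q hq
  unfold pvFindOcc at h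
  by_cases hb : q + b.length ≤ c.length
  · rw [List.find?_eq_none] at h
    have : ¬ (PySem.List.slice c (some (q:Int)) (some ((q:Int) + (b.length:Int))) == b) = true := by
      apply h; rw [List.mem_range'_1]; omega
    simp only [pvPOcc, Bool.and_eq_false_iff]
    right; exact Bool.not_eq_true _ ▸ (by simpa using this)
  · simp only [pvPOcc, Bool.and_eq_false_iff]; left; simpa using hb

-- greedy failure is monotone in the start position
theorem pvGF_none_mono {c : List String} : ∀ {L : List (List String)} {pos q : Nat},
    pos ≤ q → pvGF c pos L = none → pvGF c q L = none
  | [], pos, q, _, h => by simp [pvGF] at h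
  | b :: L, pos, q, hle, h => by
    simp only [pvGF] at h ⊢
    cases hq : pvFindOcc c b q with
    | none => rfl
    | some p' =>
      obtain ⟨h1', h2', _⟩ := pvFindOcc_some hq
      cases hp : pvFindOcc c b pos with
      | none => exact absurd h2' (by simp [pvFindOcc_none hp p' (le_trans hle h1')])
      | some p =>
        obtain ⟨h1, h2, h3⟩ := pvFindOcc_some hp
        simp only [hp] at h
        have hpp' : p ≤ p' := by
          by_contra hc
          exact absurd h2' (by simp [h3 p' (le_trans hle h1') (by omega)])
        exact pvGF_none_mono (by omega) h

-- findSome? over range: first success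
theorem pvFSR_first {γ : Type} {f : Nat → Option γ} : ∀ (n s : Nat) {j : Nat} {v : γ},
    s ≤ j → j < s + n → f j = some v → (∀ i, s ≤ i → i < j → f i = none) →
    (List.range' s n).findSome? f = some v
  | 0, s, j, v, h1, h2, _, _ => by omega
  | n+1, s, j, v, h1, h2, hv, hnone => by
    rw [List.range'_succ]
    simp only [List.findSome?_cons]
    rcases Nat.eq_or_lt_of_le h1 with he | hl
    · subst he; simp [hv]
    · rw [hnone s (le_refl s) hl]
      exact pvFSR_first n (s+1) hl (by omega) hv (fun i hi1 hi2 => hnone i (by omega) hi2)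

theorem pvFS_first {γ : Type} {f : Nat → Option γ} {k j : Nat} {v : γ} (hj : j < k)
    (hv : f j = some v) (hnone : ∀ i, i < j → f i = none) :
    (List.range k).findSome? f = some v := by
  rw [List.range_eq_range']
  exact pvFSR_first k 0 (Nat.zero_le j) (by omega) hv (fun i _ hi => hnone i hi)

theorem pvFS_none {γ : Type} {f : Nat → Option γ} {k : Nat} (h : ∀ i, i < k → f i = none) :
    (List.range k).findSome? f = none := by
  rw [List.findSome?_eq_none_iff]
  intro x hx; exact h x (List.mem_range.mp hx)

-- backtracking = greedy, for alternation-shaped sub-block lists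
theorem pvFloat (c : List String) : ∀ bs, pvAlt bs → ∀ pos, pos ≤ c.length →
    (pvHeadNS bs → pvMatchFrom c pos bs = pvGF c pos (pvLits bs)) ∧
    (∀ b t, bs = some b :: t →
      pvMatchFrom c pos bs =
        if pvPOcc c b pos = true then pvGF c (pos + b.length) (pvLits t) else none)
  | [], _, pos, hp => ⟨fun _ => by simp [pvMatchFrom, pvGF, pvLits], fun b t h => by cases h⟩
  | some b :: t, halt, pos, hp => by
    obtain ⟨hns, halt'⟩ := halt
    refine ⟨fun hfalse => absurd hfalse (by simp [pvHeadNS]), fun b' t' heq => ?_⟩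
    injection heq with hb ht
    injection hb with hb
    subst hb; subst ht
    rw [pvMatchFrom]
    by_cases hlen : c.length < pos + b.length
    · have : pvPOcc c b pos = false := by simp only [pvPOcc, Bool.and_eq_false_iff]; left; simpa using (by omega : ¬ (pos + b.length ≤ c.length))
      simp [hlen, this]
    · by_cases hsl : PySem.List.slice c (some (pos:Int)) (some ((pos:Int) + (b.length:Int))) = b
      · have hocc : pvPOcc c b pos = true := by simp [pvPOcc, hsl]; omega
        have := (pvFloat c t halt' (pos + b.length) (by omega)).1 hns
        simp [hlen, hsl, hocc, this]
      · have : pvPOcc c b pos = false := by simp [pvPOcc, hsl]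
        simp [hlen, hsl, this]
  | none :: t, halt, pos, hp => by
    refine ⟨fun _ => ?_, fun b' t' heq => by cases heq⟩
    rw [pvMatchFrom]
    have hlits : pvLits (none :: t) = pvLits t := by simp [pvLits]
    rw [hlits]
    match t, halt with
    | [], _ =>
      apply pvFS_first (j := 0) (v := pos) (by omega)
      · simp [pvMatchFrom]
      · omega
    | none :: t', halt =>
      have IH : ∀ q, q ≤ c.length → pvMatchFrom c q (none :: t') = pvGF c q (pvLits (none :: t')) :=
        fun q hq => (pvFloat c (none :: t') halt q hq).1 trivial
      have hl2 : pvLits (none :: t') = pvLits t' := by simp [pvLits]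
      cases hg : pvGF c pos (pvLits (none :: t')) with
      | some v =>
        apply pvFS_first (j := 0) (v := v) (by omega)
        · rw [Nat.add_zero, IH pos hp, hg]
        · omega
      | none =>
        apply pvFS_none
        intro i hi
        rw [IH (pos + i) (by omega)]
        exact pvGF_none_mono (by omega) hg
    | some b :: t', halt =>
      have IH : ∀ q, q ≤ c.length → pvMatchFrom c q (some b :: t') =
          if pvPOcc c b q = true then pvGF c (q + b.length) (pvLits t') else none :=
        fun q hq => (pvFloat c (some b :: t') halt q hq).2 b t' rfl
      have hl2 : pvLits (some b :: t') = b :: pvLits t' := by simp [pvLits]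
      rw [hl2]
      simp only [pvGF]
      cases hfo : pvFindOcc c b pos with
      | none =>
        apply pvFS_none
        intro i hi
        rw [IH (pos + i) (by omega), pvFindOcc_none hfo (pos + i) (by omega)]
        simp
      | some p =>
        dsimp only
        obtain ⟨hp1, hp2, hmin⟩ := pvFindOcc_some hfo
        have hpn : p + b.length ≤ c.length := by
          have := hp2; simp only [pvPOcc, Bool.and_eq_true, decide_eq_true_eq] at this; exact this.1
        cases hg : pvGF c (p + b.length) (pvLits t') with
        | some v =>
          apply pvFS_first (j := p - pos) (v := v) (by omega)
          · have hpe : pos + (p - pos) = p := by omega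
            rw [hpe, IH p (by omega), hp2, if_pos rfl, hg]
          · intro i hi
            rw [IH (pos + i) (by omega), hmin (pos + i) (by omega) (by omega)]
            simp
        | none =>
          apply pvFS_none
          intro i hi
          rw [IH (pos + i) (by omega)]
          by_cases ho : pvPOcc c b (pos + i) = true
          · rw [if_pos ho]
            have hle : p ≤ pos + i := by
              by_contra hc
              exact absurd ho (by simp [hmin (pos + i) (by omega) (by omega)])
            exact pvGF_none_mono (by omega) hg
          · simp [ho]

-- pvGreedy in terms of pvGF
theorem pvGreedy_eq (c : List String) : ∀ L pos st,
    pvGreedy c pos st L = (pvGF c pos L).map (fun e =>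
      (match L, st with
       | [], _ => st
       | _ :: _, some s => some s
       | b :: _, none => pvFindOcc c b pos, e))
  | [], pos, st => by simp [pvGreedy, pvGF]
  | b :: L, pos, st => by
    simp only [pvGreedy, pvGF]
    cases hp : pvFindOcc c b pos with
    | none => rfl
    | some p =>
      dsimp only
      rw [pvGreedy_eq c L]
      cases hg : pvGF c (p + b.length) L with
      | none => rfl
      | some e =>
        simp only [Option.map_some]
        congr 1
        cases st with
        | none => cases L <;> simp [hp]
        | some s => cases L <;> simp

theorem pvGood_app_none : ∀ sb, pvGood sb → pvGood (sb ++ [none])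
  | [], _ => trivial
  | none :: t, h => pvGood_app_none t h
  | some _ :: t, h => by
    simp only [pvGood] at h ⊢
    refine ⟨?_, pvGood_app_none t h.2⟩
    match t, h.1 with
    | a :: t', h1 => simpa using h1

theorem pvGood_app2 : ∀ sb x, pvGood sb → pvGood (sb ++ [some x, none])
  | [], x, _ => ⟨rfl, trivial⟩
  | none :: t, x, h => pvGood_app2 t x h
  | some _ :: t, x, h => by
    simp only [pvGood] at h ⊢
    refine ⟨?_, pvGood_app2 t x h.2⟩
    match t, h.1 with
    | a :: t', h1 => simpa using h1

theorem pvStepA_dots (acc : List (Option (List String)) × List String) (l : String)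
    (h : (PySem.Str.strip l == "...") = true) :
    pvStepA acc l = ((if acc.2 ≠ [] then acc.1 ++ [some acc.2] else acc.1) ++ [none], []) := by
  simp only [pvStepA, if_pos h]

theorem pvStepA_lit (acc : List (Option (List String)) × List String) (l : String)
    (h : ¬ (PySem.Str.strip l == "...") = true) :
    pvStepA acc l = (acc.1, acc.2 ++ [l]) := by
  simp only [pvStepA, if_neg h]

theorem pvStepB_dots (acc : List (List String) × List String) (l : String)
    (h : (PySem.Str.strip l == "...") = true) :
    pvStepB acc l = ((if acc.2 ≠ [] then acc.1 ++ [acc.2] else acc.1), []) := by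
  simp only [pvStepB, if_pos h]

theorem pvStepB_lit (acc : List (List String) × List String) (l : String)
    (h : ¬ (PySem.Str.strip l == "...") = true) :
    pvStepB acc l = (acc.1, acc.2 ++ [l]) := by
  simp only [pvStepB, if_neg h]

theorem pvStepA0_dots (l : String) (h : (PySem.Str.strip l == "...") = true) :
    pvStepA ([], []) l = ([none], []) := by simp [pvStepA, h]

theorem pvStepA0_lit (l : String) (h : ¬ (PySem.Str.strip l == "...") = true) :
    pvStepA ([], []) l = ([], [l]) := by simp [pvStepA, h]

theorem pvStepB0_dots (l : String) (h : (PySem.Str.strip l == "...") = true) :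
    pvStepB ([], []) l = ([], []) := by simp [pvStepB, h]

theorem pvStepB0_lit (l : String) (h : ¬ (PySem.Str.strip l == "...") = true) :
    pvStepB ([], []) l = ([], [l]) := by simp [pvStepB, h]

-- both parse folds, run side by side from related states
theorem pvParse : ∀ (ls : List String) (sb : List (Option (List String))) (cur : List String),
    pvGood sb → (sb = [] → cur ≠ []) →
    (let ra := ls.foldl pvStepA (sb, cur)
     let rb := ls.foldl pvStepB (pvLits sb, cur)
     rb.2 = ra.2 ∧ rb.1 = pvLits ra.1 ∧ pvGood ra.1 ∧ (ra.1 = [] → ra.2 ≠ []) ∧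
       (sb ≠ [] → ra.1.head? = sb.head?) ∧
       (sb = [] → ra.1 = [] ∨ ∃ x t, ra.1 = some x :: t))
  | [], sb, cur, hg, hc => ⟨rfl, rfl, hg, hc, fun _ => rfl, fun h => Or.inl (h ▸ rfl)⟩
  | l :: ls, sb, cur, hg, hc => by
    simp only [List.foldl_cons]
    by_cases hsl : (PySem.Str.strip l == "...") = true
    case neg =>
      rw [pvStepA_lit _ _ hsl, pvStepB_lit _ _ hsl]
      exact pvParse ls sb (cur ++ [l]) hg (fun _ => by simp)
    case pos =>
      rw [pvStepA_dots _ _ hsl, pvStepB_dots _ _ hsl]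
      by_cases hcur : cur ≠ []
      · simp only [if_pos hcur]
        have hlits : pvLits sb ++ [cur] = pvLits ((sb ++ [some cur]) ++ [none]) := by
          simp [pvLits]
        have hgood : pvGood ((sb ++ [some cur]) ++ [none]) := by
          have := pvGood_app2 sb cur hg; simpa using this
        have := pvParse ls ((sb ++ [some cur]) ++ [none]) [] hgood (by simp)
        rw [hlits]
        obtain ⟨h1, h2, h3, h4, h5, _⟩ := this
        refine ⟨h1, h2, h3, h4, fun hne => ?_, fun he => ?_⟩
        · rw [h5 (by simp)]
          cases sb with
          | nil => exact absurd rfl hne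
          | cons a t => simp
        · subst he
          have hh : _ = some (some cur) := (h5 (by simp)).trans rfl
          refine Or.inr ?_
          revert hh
          generalize (List.foldl _ (([] : List (Option (List String))) ++ [some cur] ++ [none], ([] : List String)) ls).1 = L
          intro hh
          cases L with
          | nil => simp at hh
          | cons a t =>
            cases a with
            | none => simp at hh
            | some x => exact ⟨x, t, rfl⟩
      · simp only [if_neg hcur]
        have hgood : pvGood (sb ++ [none]) := pvGood_app_none sb hg
        have hlits : pvLits sb = pvLits (sb ++ [none]) := by simp [pvLits]
        have := pvParse ls (sb ++ [none]) [] hgood (by simp)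
        rw [hlits]
        obtain ⟨h1, h2, h3, h4, h5, _⟩ := this
        refine ⟨h1, h2, h3, h4, fun hne => ?_, fun he => ?_⟩
        · rw [h5 (by simp)]
          cases sb with
          | nil => exact absurd rfl hne
          | cons a t => simp
        · subst he
          exact absurd (hc rfl) hcur
  termination_by ls => ls.length

-- the whole search loop of A equals the greedy loop of B, given the parse facts
theorem pvCore (content : List String) (sbF : List (Option (List String))) (blF : List (List String)) (leadWild : Bool)
    (hbl : blF = pvLits sbF) (halt : pvAlt sbF)
    (hheadT : leadWild = true → sbF.head? = some none)
    (hheadF : leadWild = false → ∃ b t, sbF = some b :: t) :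
    ((List.range (content.length + 1)).findSome? (fun start =>
      match pvMatchFrom content start sbF with
      | some e => some (PySem.Str.join "" (PySem.List.slice content none (some (start:Int)) ++ PySem.List.slice content (some ((e:Nat):Int)) none))
      | none => none))
    = match pvGreedy content 0 none blF with
      | none => none
      | some (stFin, pos) =>
        some (PySem.Str.join "" (PySem.List.slice content none (some (((if leadWild || stFin.isNone then 0 else stFin.getD 0) : Nat):Int)) ++ PySem.List.slice content (some ((pos:Nat):Int)) none)) := by
  cases leadWild with
  | true =>
    have hh := hheadT rfl
    match sbF, hh, halt, hbl with
    | none :: t, _, halt, hbl =>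
    have hfl : ∀ q, q ≤ content.length → pvMatchFrom content q (none :: t) = pvGF content q blF := by
      intro q hq
      rw [(pvFloat content (none :: t) halt q hq).1 trivial]
      rw [hbl]
    rw [pvGreedy_eq]
    cases hg : pvGF content 0 blF with
    | none =>
      simp only [Option.map_none]
      apply pvFS_none
      intro i hi
      rw [hfl i (by omega)]
      rw [pvGF_none_mono (Nat.zero_le i) hg]
    | some e =>
      simp only [Option.map_some]
      apply pvFS_first (k := content.length + 1) (j := 0) (by omega) ?_
        (fun i h => absurd h (by omega))
      rw [hfl 0 (by omega), hg]
      rfl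
  | false =>
    obtain ⟨b, t, hsb⟩ := hheadF rfl
    subst hsb
    obtain ⟨hns, halt'⟩ := halt
    have hbl' : blF = b :: pvLits t := by rw [hbl]; rfl
    have hfl : ∀ q, q ≤ content.length → pvMatchFrom content q (some b :: t) =
        if pvPOcc content b q = true then pvGF content (q + b.length) (pvLits t) else none :=
      fun q hq => (pvFloat content (some b :: t) ⟨hns, halt'⟩ q hq).2 b t rfl
    rw [pvGreedy_eq, hbl']
    simp only [pvGF]
    cases hfo : pvFindOcc content b 0 with
    | none =>
      dsimp only
      apply pvFS_none
      intro i hi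
      rw [hfl i (by omega), pvFindOcc_none hfo i (Nat.zero_le i)]
      simp
    | some p =>
      dsimp only
      obtain ⟨_, hocc, hmin⟩ := pvFindOcc_some hfo
      have hpn : p + b.length ≤ content.length := by
        simp only [pvPOcc, Bool.and_eq_true, decide_eq_true_eq] at hocc; exact hocc.1
      cases hg : pvGF content (p + b.length) (pvLits t) with
      | none =>
        simp only [Option.map_none]
        apply pvFS_none
        intro i hi
        rw [hfl i (by omega)]
        by_cases ho : pvPOcc content b i = true
        · rw [if_pos ho]
          have hpi : p ≤ i := by
            by_contra hc
            exact absurd ho (by simp [hmin i (Nat.zero_le i) (by omega)])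
          rw [pvGF_none_mono (show p + b.length ≤ i + b.length by omega) hg]
        · simp [ho]
      | some e =>
        simp only [Option.map_some]
        apply pvFS_first (k := content.length + 1) (j := p) (by omega) ?_ (fun i hi => ?_)
        · rw [hfl p (by omega), if_pos hocc, hg]
          rfl
        · rw [hfl i (by omega)]
          rw [hmin i (Nat.zero_le i) hi]
          simp

theorem pvMain (chunks content : List String) :
    try_dotdotdots chunks content = try_dotdotdots_alt chunks content := by
  match chunks with
  | [] => rfl
  | c0 :: rest =>
    simp only [try_dotdotdots, try_dotdotdots_alt, pvSubBlocks, List.foldl_cons]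
    by_cases hsl : (PySem.Str.strip c0 == "...") = true
    case pos =>
      rw [pvStepA0_dots c0 hsl, pvStepB0_dots c0 hsl]
      have hP := pvParse rest [none] [] trivial (by simp)
      simp only [show pvLits [none] = ([] : List (List String)) from rfl] at hP
      obtain ⟨h1, h2, h3, h4, h5, _⟩ := hP
      have hhd : _ = some none := (h5 (by simp)).trans rfl
      rw [h1, h2]
      by_cases hcur : (List.foldl pvStepA ([none], []) rest).2 ≠ []
      · rw [if_pos hcur, if_pos hcur]
        apply pvCore
        · simp [pvLits]
        · exact pvGood_alt_append _ _ h3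
        · intro _
          revert hhd
          generalize (List.foldl pvStepA (([none] : List (Option (List String))), ([]:List String)) rest).1 = L
          intro hhd
          cases L with
          | nil => simp at hhd
          | cons a t => simp at hhd ⊢; simp [hhd]
        · intro hfalse; rw [hsl] at hfalse; cases hfalse
      · rw [if_neg hcur, if_neg hcur]
        apply pvCore
        · rfl
        · exact pvGood_alt _ h3
        · intro _; exact hhd
        · intro hfalse; rw [hsl] at hfalse; cases hfalse
    case neg =>
      rw [pvStepA0_lit c0 hsl, pvStepB0_lit c0 hsl]
      have hP := pvParse rest [] [c0] trivial (by simp)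
      simp only [show pvLits ([] : List (Option (List String))) = ([] : List (List String)) from rfl] at hP
      obtain ⟨h1, h2, h3, h4, _, h6⟩ := hP
      rw [h1, h2]
      rcases h6 trivial with he | ⟨x, t, hx⟩
      · have hc2 := h4 he
        rw [he]
        rw [if_pos hc2, if_pos hc2]
        apply pvCore
        · rfl
        · exact ⟨trivial, trivial⟩
        · intro hfalse; exact absurd hfalse hsl
        · intro _; exact ⟨_, _, rfl⟩
      · rw [hx]
        by_cases hcur : (List.foldl pvStepA ([], [c0]) rest).2 ≠ []
        · rw [if_pos hcur, if_pos hcur]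
          apply pvCore
          · simp [pvLits]
          · exact pvGood_alt_append _ _ (hx ▸ h3)
          · intro hfalse; exact absurd hfalse hsl
          · intro _; exact ⟨x, t ++ [some (List.foldl pvStepA ([], [c0]) rest).2], by simp⟩
        · rw [if_neg hcur, if_neg hcur]
          apply pvCore
          · rfl
          · exact pvGood_alt _ (hx ▸ h3)
          · intro hfalse; exact absurd hfalse hsl
          · intro _; exact ⟨x, t, rfl⟩

-- ===== VERDICT (by name: the statement is the Claim_ definition above) =====
theorem try_dotdotdots_spec : Claim_equal_try_dotdotdots := by
  intro chunks content _
  exact pvMain chunks content
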